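-- pv_equiv track=rewrite | github.com/ollybritton/spotify-song-cleaner | main.py | group_liked_songs
-- ===== SOURCE A (Python) =====
-- def group_liked_songs(songs):
--     groups = []
--
--     for song in songs:
--         if len(groups) == 0 or groups[len(groups)-1][0]['album']['uri'] != song['album']['uri']:
--             groups.append([song])
--         else:
--             groups[len(groups)-1].append(song)
--
--     return groups
-- ===== SOURCE B (Python) =====
-- def group_liked_songs(songs):
--     groups = []
--     i, n = 0, len(songs)
--     while i < n:
--         key = songs[i]['album']['uri']
--         j = i + 1
--         while j < n and songs[j]['album']['uri'] == key:
--             j += 1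
--         groups.append(songs[i:j])
--         i = j
--     return groups
-- ===== Notes on version B (the rewrite author's own statement) =====
-- stated objective: alternative
-- what changed: B scans forward with two indices, finding each maximal run of equal album uris and slicing it out in one step, instead of A's pass that compares each song against the first song of the last group already appended to the output.
-- outside the precondition, e.g. on group_liked_songs([{}]): A returns [[{}]], B raises KeyError
import Mathlib
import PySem

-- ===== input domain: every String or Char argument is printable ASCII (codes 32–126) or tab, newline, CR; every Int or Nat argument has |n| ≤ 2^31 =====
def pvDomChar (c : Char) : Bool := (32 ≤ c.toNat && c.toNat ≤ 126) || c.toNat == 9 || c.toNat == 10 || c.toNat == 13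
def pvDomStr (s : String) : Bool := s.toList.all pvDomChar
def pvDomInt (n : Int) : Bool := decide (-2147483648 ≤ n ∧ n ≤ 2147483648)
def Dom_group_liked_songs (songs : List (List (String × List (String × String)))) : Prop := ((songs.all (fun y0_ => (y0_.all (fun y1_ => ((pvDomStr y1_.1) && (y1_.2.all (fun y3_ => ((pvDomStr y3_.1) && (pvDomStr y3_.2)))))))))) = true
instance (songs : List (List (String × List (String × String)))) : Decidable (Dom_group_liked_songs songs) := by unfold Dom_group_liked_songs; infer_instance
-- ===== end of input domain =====

-- B finds maximal runs of equal album uris with a forward two-index scan (recursion + run split)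
-- instead of A's comparison against the first song of the last group already in the output; same cost.

-- ===== PORT A =====
-- song['album']['uri']; total helper, '""' default only reached outside Pre_ (where Python raises KeyError)
-- first-match lookup on an association list = reading a Python dict key (keys are unique)
def pvGet? {v : Type} (d : List (String × v)) (k : String) : Option v :=
  (d.find? (fun p => p.1 == k)).map (·.2)

def pvUri (song : List (String × List (String × String))) : String :=
  match pvGet? song "album" with
  | none => ""
  | some alb => (pvGet? alb "uri").getD ""

def pvStepA (groups : List (List (List (String × List (String × String)))))
    (song : List (String × List (String × String))) : List (List (List (String × List (String × String)))) :=
  if groups.length = 0 ∨ pvUri ((groups.getLastD []).headD []) ≠ pvUri song then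
    groups ++ [[song]]
  else
    groups.dropLast ++ [groups.getLastD [] ++ [song]]

def group_liked_songs (songs : List (List (String × List (String × String)))) : List (List (List (String × List (String × String)))) :=
  songs.foldl pvStepA []

-- ===== PORT B =====
-- the inner 'while j < n and songs[j][...] == key' loop: split the maximal run with uri = k
def pvRun (k : String) : List (List (String × List (String × String))) →
    List (List (String × List (String × String))) × List (List (String × List (String × String)))
  | [] => ([], [])
  | s :: rest =>
    if pvUri s = k then
      let p := pvRun k rest
      (s :: p.1, p.2)
    else ([], s :: rest)

theorem pvRun_snd_le (k : String) (xs : List (List (String × List (String × String)))) :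
    (pvRun k xs).2.length ≤ xs.length := by
  induction xs with
  | nil => simp [pvRun]
  | cons s rest ih =>
    simp only [pvRun]
    split
    · exact Nat.le_succ_of_le ih
    · simp

def group_liked_songs_alt (songs : List (List (String × List (String × String)))) : List (List (List (String × List (String × String)))) :=
  match songs with
  | [] => []
  | s :: rest =>
    let p := pvRun (pvUri s) rest
    (s :: p.1) :: group_liked_songs_alt p.2
termination_by songs.length
decreasing_by
  simpa using Nat.lt_succ_of_le (pvRun_snd_le (pvUri s) rest)

-- ===== PRECONDITION & SPEC =====
-- Pre_ excludes inputs where some song lacks an 'album' key or its album dict lacks 'uri':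
-- A raises KeyError there, except for a single-song list, where A's or-short-circuit skips the
-- key lookup and returns [[song]] while B (which always reads the key) raises KeyError.
def Pre_group_liked_songs (songs : List (List (String × List (String × String)))) : Prop :=
  ∀ song ∈ songs, ((pvGet? song "album").bind (fun alb => pvGet? alb "uri")).isSome = true
instance (songs : List (List (String × List (String × String)))) : Decidable (Pre_group_liked_songs songs) := by unfold Pre_group_liked_songs; infer_instance
def pvWitness_group_liked_songs : (List (List (String × List (String × String)))) :=
  [[("album", [("uri", "spotify:album:1")])], [("album", [("uri", "spotify:album:1")])], [("album", [("uri", "spotify:album:2")])]]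

def Spec_group_liked_songs (songs : List (List (String × List (String × String)))) (out : List (List (List (String × List (String × String))))) : Prop := out = group_liked_songs_alt songs
instance (songs : List (List (String × List (String × String)))) (out : List (List (List (String × List (String × String))))) : Decidable (Spec_group_liked_songs songs out) := by unfold Spec_group_liked_songs; infer_instance

-- ===== CLAIM (what is proved, stated in full; the proofs are below) =====
def Claim_equal_group_liked_songs : Prop := ∀ (songs : List (List (String × List (String × String)))), Dom_group_liked_songs songs → Pre_group_liked_songs songs → Spec_group_liked_songs songs (group_liked_songs songs)

-- ===== LEMMAS AND PROOFS =====

theorem pvHeadD_append (g : List (List (String × List (String × String)))) (x d : List (String × List (String × String)))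
    (h : g ≠ []) : (g ++ [x]).headD d = g.headD d := by
  cases g with
  | nil => exact absurd rfl h
  | cons a t => rfl

theorem pvFoldl_runs (songs : List (List (String × List (String × String))))
    (acc : List (List (List (String × List (String × String)))))
    (g : List (List (String × List (String × String)))) (hg : g ≠ []) :
    List.foldl pvStepA (acc ++ [g]) songs =
      acc ++ [g ++ (pvRun (pvUri (g.headD [])) songs).1]
        ++ group_liked_songs_alt (pvRun (pvUri (g.headD [])) songs).2 := by
  induction songs generalizing acc g with
  | nil => simp [pvRun, group_liked_songs_alt]
  | cons x xs ih =>
    have hlast : (acc ++ [g]).getLastD [] = g := by simp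
    by_cases hk : pvUri x = pvUri (g.headD [])
    · have hstep : pvStepA (acc ++ [g]) x = acc ++ [g ++ [x]] := by
        simp [pvStepA, hk]
      have hgx : (g ++ [x]) ≠ [] := by simp
      have hh : (g ++ [x]).headD ([] : List (String × List (String × String))) = g.headD [] :=
        pvHeadD_append g x [] hg
      simp only [List.foldl_cons, hstep, ih acc (g ++ [x]) hgx, hh]
      simp [pvRun, hk]
    · have hstep : pvStepA (acc ++ [g]) x = (acc ++ [g]) ++ [[x]] := by
        simp only [pvStepA, hlast]
        rw [if_pos]
        right
        exact fun h => hk h.symm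
      have hx : ([x] : List (List (String × List (String × String)))) ≠ [] := by simp
      simp only [List.foldl_cons, hstep, ih (acc ++ [g]) [x] hx]
      have hk2 : ¬ pvUri x = pvUri (g.head?.getD []) := by
        cases g with
        | nil => exact absurd rfl hg
        | cons a t => exact hk
      have hrun : pvRun (pvUri (g.head?.getD [])) (x :: xs) = ([], x :: xs) := by
        simp only [pvRun, if_neg hk2]
      have halt : group_liked_songs_alt (x :: xs) =
          (x :: (pvRun (pvUri x) xs).1) :: group_liked_songs_alt (pvRun (pvUri x) xs).2 := by
        simp [group_liked_songs_alt]
      simp [hrun, halt]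

-- ===== VERDICT (by name: the statement is the Claim_ definition above) =====
theorem group_liked_songs_spec : Claim_equal_group_liked_songs := by
  intro songs _ _
  unfold Spec_group_liked_songs group_liked_songs
  cases songs with
  | nil => simp [group_liked_songs_alt]
  | cons s rest =>
    have hstep : pvStepA [] s = [] ++ [[s]] := by simp [pvStepA]
    have hs : ([s] : List (List (String × List (String × String)))) ≠ [] := by simp
    simp only [List.foldl_cons, hstep, pvFoldl_runs rest [] [s] hs]
    simp [group_liked_songs_alt]
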